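-- pv_equiv track=rewrite | github.com/satyaog/diplomacy_benchmark | bench.py | compute_ranking
-- ===== SOURCE A (Python) =====
-- def compute_ranking(power_names, nb_centers, elimination_orders):
--     ranking_data = list(zip(power_names, nb_centers, elimination_orders))
--     # ording based on nb_centers
--     ranking_data.sort(key=lambda element: -element[1])
--     ranking = [0] * 7
--     for i, (power_name, nb_centers, _) in enumerate(ranking_data):
--         rank = max(ranking) + 1
--         if i > 0:
--             previous_power_name, previous_nb_centers, _ = ranking_data[i - 1]
--             if nb_centers == previous_nb_centers:
--                 rank = ranking[power_names.index(previous_power_name)]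
--
--         ranking[power_names.index(power_name)] = rank
--
--     for i, (power_name, nb_centers, elimination_order) in enumerate(ranking_data):
--         if i > 0:
--             previous_power_name, previous_nb_centers, _ = ranking_data[i - 1]
--             if elimination_order:
--                 ranking[power_names.index(power_name)] += \
--                     max(elimination_orders) - elimination_order
--
--     return ranking
-- ===== SOURCE B (Python) =====
-- def compute_ranking(power_names, nb_centers, elimination_orders):
--     triples = sorted(zip(power_names, nb_centers, elimination_orders),
--                      key=lambda t: -t[1])
--     # dense-rank table: distinct center counts in descending order
--     distinct = sorted({c for _, c, _ in triples}, reverse=True)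
--     ranking = [0] * 7
--     for name, c, _ in triples:
--         ranking[power_names.index(name)] = distinct.index(c) + 1
--     m = max(elimination_orders) if elimination_orders else 0
--     for name, _, order in triples[1:]:
--         if order:
--             ranking[power_names.index(name)] += m - order
--     return ranking
-- ===== Notes on version B (the rewrite author's own statement) =====
-- stated objective: simpler
-- what changed: A re-scans the ranking array with max(ranking)+1 and re-reads the previous sorted element at every step, and recomputes max(elimination_orders) for every row of its second loop; B precomputes the dense-rank table as the descending list of distinct center counts, assigns each power its position in that table in one plain pass, and computes the elimination maximum once before adjusting the sorted tail.
import Mathlib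
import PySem

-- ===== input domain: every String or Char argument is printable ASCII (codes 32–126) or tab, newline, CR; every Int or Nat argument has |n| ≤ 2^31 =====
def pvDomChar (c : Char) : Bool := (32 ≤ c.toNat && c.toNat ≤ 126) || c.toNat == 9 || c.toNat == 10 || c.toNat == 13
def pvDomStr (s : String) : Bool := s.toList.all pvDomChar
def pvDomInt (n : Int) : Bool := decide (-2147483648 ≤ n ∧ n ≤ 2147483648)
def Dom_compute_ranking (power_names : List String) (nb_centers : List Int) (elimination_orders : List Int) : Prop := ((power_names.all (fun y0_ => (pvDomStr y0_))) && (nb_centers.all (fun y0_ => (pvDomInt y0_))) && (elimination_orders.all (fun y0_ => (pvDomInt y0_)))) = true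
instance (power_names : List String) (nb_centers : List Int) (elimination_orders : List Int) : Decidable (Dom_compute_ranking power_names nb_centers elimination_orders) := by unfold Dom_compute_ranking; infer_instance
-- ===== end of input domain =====

-- B replaces A's incremental max(ranking)+1 rank bookkeeping by a precomputed dense-rank
-- table (position in the descending list of distinct center counts); objective: simpler.

-- ===== PORT A =====
def compute_ranking (power_names : List String) (nb_centers : List Int) (elimination_orders : List Int) : List Int :=
  let ranking_data := PySem.List.sorted (power_names.zip (nb_centers.zip elimination_orders)) (fun t => -t.2.1)
  let ranking : List Int := PySem.List.pyRepeat [0] 7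
  let ranking := (PySem.List.enumerate ranking_data).foldl (fun ranking p =>
    let i := p.1
    let t := p.2
    let rank := ((PySem.List.max? ranking (fun x => x)).getD 0) + 1
    let rank := if i > 0 then
        let prev := (PySem.List.pyGet? ranking_data (i - 1)).getD ("", 0, 0)
        if t.2.1 == prev.2.1 then
          ranking.getD ((PySem.List.index? power_names prev.1).getD 0) 0
        else rank
      else rank
    ranking.set ((PySem.List.index? power_names t.1).getD 0) rank) ranking
  let ranking := (PySem.List.enumerate ranking_data).foldl (fun ranking p =>
    let i := p.1
    let t := p.2
    if i > 0 then
      if t.2.2 ≠ 0 then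
        let idx := (PySem.List.index? power_names t.1).getD 0
        ranking.set idx (ranking.getD idx 0 + (((PySem.List.max? elimination_orders (fun x => x)).getD 0) - t.2.2))
      else ranking
    else ranking) ranking
  ranking

-- ===== PORT B =====
def compute_ranking_alt (power_names : List String) (nb_centers : List Int) (elimination_orders : List Int) : List Int :=
  let triples := PySem.List.sorted (power_names.zip (nb_centers.zip elimination_orders)) (fun t => -t.2.1)
  -- dense-rank table: distinct center counts in descending order
  let distinct := PySem.List.sorted (PySem.Set.ofList (triples.map (fun t => t.2.1))) (fun x => x) true
  let ranking : List Int := PySem.List.pyRepeat [0] 7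
  let ranking := triples.foldl (fun ranking t =>
    ranking.set ((PySem.List.index? power_names t.1).getD 0)
      (((PySem.List.index? distinct t.2.1).getD 0 : Int) + 1)) ranking
  let m := if elimination_orders ≠ [] then (PySem.List.max? elimination_orders (fun x => x)).getD 0 else 0
  let ranking := (triples.drop 1).foldl (fun ranking t =>
    if t.2.2 ≠ 0 then
      let idx := (PySem.List.index? power_names t.1).getD 0
      ranking.set idx (ranking.getD idx 0 + (m - t.2.2))
    else ranking) ranking
  ranking

-- ===== PRECONDITION & SPEC =====
-- Pre_ excludes exactly the inputs where A raises IndexError: a zipped power name whose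
-- first occurrence in power_names is at index ≥ 7 (the fixed-size ranking list has 7 slots).
def Pre_compute_ranking (power_names : List String) (nb_centers : List Int) (elimination_orders : List Int) : Prop :=
  ∀ t ∈ power_names.zip (nb_centers.zip elimination_orders), t.1 ∈ power_names.take 7
instance (power_names : List String) (nb_centers : List Int) (elimination_orders : List Int) : Decidable (Pre_compute_ranking power_names nb_centers elimination_orders) := by unfold Pre_compute_ranking; infer_instance

def pvWitness_compute_ranking : List String × List Int × List Int :=
  (["FRA", "ENG", "GER"], [5, 2, 2], [0, 3, 1])

def Spec_compute_ranking (power_names : List String) (nb_centers : List Int) (elimination_orders : List Int) (out : List Int) : Prop := out = compute_ranking_alt power_names nb_centers elimination_orders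
instance (power_names : List String) (nb_centers : List Int) (elimination_orders : List Int) (out : List Int) : Decidable (Spec_compute_ranking power_names nb_centers elimination_orders out) := by unfold Spec_compute_ranking; infer_instance

-- ===== CLAIM (what is proved, stated in full; the proofs are below) =====
def Claim_equal_compute_ranking : Prop := ∀ (power_names : List String) (nb_centers : List Int) (elimination_orders : List Int), Dom_compute_ranking power_names nb_centers elimination_orders → Pre_compute_ranking power_names nb_centers elimination_orders → Spec_compute_ranking power_names nb_centers elimination_orders (compute_ranking power_names nb_centers elimination_orders)

-- ===== LEMMAS AND PROOFS =====

-- slot of a triple: first index of its name in power_names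
def pvSlot (pn : List String) (t : String × Int × Int) : Nat :=
  (PySem.List.index? pn t.1).getD 0

-- B's dense rank of a center count
def pvVal (distinct : List Int) (c : Int) : Int :=
  ((PySem.List.index? distinct c).getD 0 : Int) + 1

-- Python max(r) for a nonempty list with a known maximal member
lemma pvMaxGetD (r : List Int) (m : Int) (hm : m ∈ r) (hb : ∀ x ∈ r, x ≤ m) :
    (PySem.List.max? r (fun x => x)).getD 0 = m := by
  cases h : PySem.List.max? r (fun x => x) with
  | none =>
      rw [PySem.List.max?_eq_none_iff] at h
      subst h; cases hm
  | some mm =>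
      have h1 := PySem.List.max?_isMax h m hm
      have h2 := hb mm (PySem.List.max?_mem h)
      simpa using le_antisymm h2 h1

-- in a strictly descending list, the index of a member counts the strictly greater entries
lemma pvIdxCount (l : List Int) (hs : l.Pairwise (fun a b => b < a)) (c : Int) (hc : c ∈ l) :
    ((PySem.List.index? l c).getD 0 : Int) = (l.countP (fun d => decide (c < d)) : Int) := by
  induction l with
  | nil => cases hc
  | cons d tl ih =>
      rcases List.pairwise_cons.mp hs with ⟨hd, htl⟩
      by_cases hcd : c = d
      · subst hcd
        rw [PySem.List.index?_cons_self]
        have h0 : tl.countP (fun x => decide (c < x)) = 0 :=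
          List.countP_eq_zero.mpr (fun x hx => by simpa using not_lt.mpr (le_of_lt (hd x hx)))
        simp [List.countP_cons, h0]
      · have hmem : c ∈ tl := by
          rcases List.mem_cons.mp hc with h | h
          · exact absurd h hcd
          · exact h
        have hlt : c < d := hd c hmem
        rw [PySem.List.index?_cons_of_ne _ (Ne.symm hcd)]
        obtain ⟨k, hk⟩ := Option.isSome_iff_exists.mp ((PySem.List.index?_isSome_iff tl c).mpr hmem)
        have hrec := ih htl hmem
        rw [hk] at hrec ⊢
        simp only [Option.getD_some] at hrec
        simp only [Option.map_some, Option.getD_some, List.countP_cons]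
        simp only [show decide (c < d) = true from by simpa using hlt]
        push_cast at hrec ⊢
        omega

-- the descending list of distinct center counts is strictly descending
lemma pvDistinctSorted (cs : List Int) :
    (PySem.List.sorted (PySem.Set.ofList cs) (fun x => x) true).Pairwise (fun a b => b < a) := by
  have hnd : (PySem.List.sorted (PySem.Set.ofList cs) (fun x => x) false).Nodup :=
    (PySem.List.sorted_perm (PySem.Set.ofList cs) (fun x => x) false).nodup_iff.mpr
      (PySem.Set.nodup_ofList cs)
  have hpw := PySem.List.sorted_pairwise (PySem.Set.ofList cs) (fun x => x)
  have heq : PySem.List.sorted (PySem.Set.ofList cs) (fun x => x) true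
      = (PySem.List.sorted (PySem.Set.ofList cs) (fun x => x) false).reverse := by
    apply PySem.List.sorted_rev_eq_of_perm_of_pairwise_gt
    · exact (List.reverse_perm _).trans (PySem.List.sorted_perm _ _ _)
    · rw [List.pairwise_reverse]
      exact (hpw.and hnd).imp (fun h => lt_of_le_of_ne h.1 h.2)
  rw [heq, List.pairwise_reverse]
  exact (hpw.and hnd).imp (fun h => lt_of_le_of_ne h.1 h.2)

-- rank of the largest center count is 1
lemma pvValTop (distinct : List Int) (hs : distinct.Pairwise (fun a b => b < a)) (c : Int)
    (hc : c ∈ distinct) (htop : ∀ d ∈ distinct, d ≤ c) : pvVal distinct c = 1 := by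
  unfold pvVal
  rw [pvIdxCount distinct hs c hc]
  have h0 : distinct.countP (fun d => decide (c < d)) = 0 :=
    List.countP_eq_zero.mpr (fun x hx => by simpa using not_lt.mpr (htop x hx))
  rw [h0]
  simp

-- monotonicity: smaller center count, larger (or equal) rank
lemma pvValMono (distinct : List Int) (hs : distinct.Pairwise (fun a b => b < a))
    (cq cp : Int) (hle : cq ≤ cp) (hcq : cq ∈ distinct) (hcp : cp ∈ distinct) :
    pvVal distinct cp ≤ pvVal distinct cq := by
  unfold pvVal
  rw [pvIdxCount distinct hs cp hcp, pvIdxCount distinct hs cq hcq]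
  have := List.countP_mono_left
    (l := distinct) (p := fun d => decide (cp < d)) (q := fun d => decide (cq < d))
    (fun x _ h => by simp at h ⊢; omega)
  omega

-- counting step: crossing to a strictly smaller center count with nothing in between
lemma pvCountStep (l : List Int) (hs : l.Pairwise (fun a b => b < a)) (cp cq : Int)
    (hq : cq < cp) (hni : ∀ d ∈ l, ¬(cq < d ∧ d < cp)) (hcp : cp ∈ l) :
    l.countP (fun d => decide (cq < d)) = l.countP (fun d => decide (cp < d)) + 1 := by
  induction l with
  | nil => cases hcp
  | cons d tl ih =>
      rcases List.pairwise_cons.mp hs with ⟨hd, htl⟩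
      rcases List.mem_cons.mp hcp with rfl | hcptl
      · have h1 : tl.countP (fun x => decide (cp < x)) = 0 :=
          List.countP_eq_zero.mpr (fun x hx => by simpa using not_lt.mpr (le_of_lt (hd x hx)))
        have h2 : tl.countP (fun x => decide (cq < x)) = 0 :=
          List.countP_eq_zero.mpr (fun x hx => by
            have h3 := hd x hx
            have h4 := hni x (List.mem_cons_of_mem _ hx)
            simp only [decide_eq_true_eq]
            omega)
        simp [List.countP_cons, h1, h2, hq, lt_irrefl]
      · have hdgt : cp < d := hd cp hcptl
        have hrec := ih htl (fun x hx => hni x (List.mem_cons_of_mem _ hx)) hcptl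
        simp [List.countP_cons, show cq < d from hq.trans hdgt, hdgt, hrec]

-- rank step: adjacent center counts in the sorted data differ by one rank
lemma pvValStep (distinct : List Int) (hs : distinct.Pairwise (fun a b => b < a))
    (cp cq : Int) (hq : cq < cp) (hni : ∀ d ∈ distinct, ¬(cq < d ∧ d < cp))
    (hcp : cp ∈ distinct) (hcq : cq ∈ distinct) :
    pvVal distinct cq = pvVal distinct cp + 1 := by
  unfold pvVal
  rw [pvIdxCount distinct hs cp hcp, pvIdxCount distinct hs cq hcq,
    pvCountStep distinct hs cp cq hq hni hcp]
  push_cast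
  ring

-- a name occurring among the first 7 has first index < 7
lemma pvSlotLt (pn : List String) (t : String × Int × Int) (hx : t.1 ∈ pn.take 7) :
    pvSlot pn t < 7 := by
  unfold pvSlot
  have hmem : t.1 ∈ pn := List.mem_of_mem_take hx
  obtain ⟨k, hk⟩ := Option.isSome_iff_exists.mp ((PySem.List.index?_isSome_iff pn t.1).mpr hmem)
  obtain ⟨hklt, hgetk, hmin⟩ := PySem.List.getElem_of_index?_eq_some hk
  rw [hk]
  simp only [Option.getD_some]
  by_contra h7
  push_neg at h7
  obtain ⟨j, hj, hgj⟩ := List.mem_iff_getElem.mp hx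
  have hlen : (pn.take 7).length = min 7 pn.length := List.length_take
  have hj7 : j < 7 := by omega
  have hjpn : j < pn.length := by omega
  have hq : pn[j] = t.1 := by
    rw [List.getElem_take] at hgj
    exact hgj
  exact hmin j (by omega) hq

-- the sorted data and the rank table, as named objects for the proofs
def pvRd (pn : List String) (nc : List Int) (eo : List Int) : List (String × Int × Int) :=
  PySem.List.sorted (pn.zip (nc.zip eo)) (fun t => -t.2.1)

def pvDistinct (pn : List String) (nc : List Int) (eo : List Int) : List Int :=
  PySem.List.sorted (PySem.Set.ofList ((pvRd pn nc eo).map (fun t => t.2.1))) (fun x => x) true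

-- the four loop bodies, verbatim from the two ports
def pvBodyA (pn : List String) (rd : List (String × Int × Int))
    (ranking : List Int) (p : Int × (String × Int × Int)) : List Int :=
  ranking.set ((PySem.List.index? pn p.2.1).getD 0)
    (if p.1 > 0 then
      (if p.2.2.1 == ((PySem.List.pyGet? rd (p.1 - 1)).getD ("", 0, 0)).2.1 then
        ranking.getD
          ((PySem.List.index? pn ((PySem.List.pyGet? rd (p.1 - 1)).getD ("", 0, 0)).1).getD 0) 0
      else ((PySem.List.max? ranking (fun x => x)).getD 0) + 1)
    else ((PySem.List.max? ranking (fun x => x)).getD 0) + 1)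

def pvBody2A (pn : List String) (eo : List Int)
    (ranking : List Int) (p : Int × (String × Int × Int)) : List Int :=
  if p.1 > 0 then
    if p.2.2.2 ≠ 0 then
      ranking.set ((PySem.List.index? pn p.2.1).getD 0)
        (ranking.getD ((PySem.List.index? pn p.2.1).getD 0) 0
          + (((PySem.List.max? eo (fun x => x)).getD 0) - p.2.2.2))
    else ranking
  else ranking

def pvStepB (pn : List String) (distinct : List Int)
    (ranking : List Int) (t : String × Int × Int) : List Int :=
  ranking.set ((PySem.List.index? pn t.1).getD 0)
    (((PySem.List.index? distinct t.2.1).getD 0 : Int) + 1)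

def pvBody2B (pn : List String) (m : Int)
    (ranking : List Int) (t : String × Int × Int) : List Int :=
  if t.2.2 ≠ 0 then
    ranking.set ((PySem.List.index? pn t.1).getD 0)
      (ranking.getD ((PySem.List.index? pn t.1).getD 0) 0 + (m - t.2.2))
  else ranking

lemma pvA_unfold (pn : List String) (nc : List Int) (eo : List Int) :
    compute_ranking pn nc eo =
      (PySem.List.enumerate (pvRd pn nc eo)).foldl (pvBody2A pn eo)
        ((PySem.List.enumerate (pvRd pn nc eo)).foldl (pvBodyA pn (pvRd pn nc eo))
          (List.replicate 7 0)) := rfl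

lemma pvB_unfold (pn : List String) (nc : List Int) (eo : List Int) :
    compute_ranking_alt pn nc eo =
      ((pvRd pn nc eo).drop 1).foldl
        (pvBody2B pn (if eo ≠ [] then (PySem.List.max? eo (fun x => x)).getD 0 else 0))
        ((pvRd pn nc eo).foldl (pvStepB pn (pvDistinct pn nc eo)) (List.replicate 7 0)) := rfl

-- A's incremental first loop computes exactly B's table lookups, step by step
lemma pvLoop1 (pn : List String) (distinct : List Int) (rd : List (String × Int × Int))
    (hsort : rd.Pairwise (fun a b => b.2.1 ≤ a.2.1))
    (hslot : ∀ t ∈ rd, pvSlot pn t < 7)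
    (hdist : ∀ c, c ∈ distinct ↔ c ∈ rd.map (fun t => t.2.1))
    (hdsort : distinct.Pairwise (fun a b => b < a)) :
    ∀ (rest done : List (String × Int × Int)) (p : String × Int × Int) (r : List Int),
    rd = done ++ p :: rest →
    r.length = 7 →
    (∀ x ∈ r, x ≤ pvVal distinct p.2.1) →
    r.getD (pvSlot pn p) 0 = pvVal distinct p.2.1 →
    (PySem.List.enumerate rest ((done.length : Int) + 1)).foldl (pvBodyA pn rd) r
      = rest.foldl (pvStepB pn distinct) r := by
  intro rest
  induction rest with
  | nil => intro done p r _ _ _ _; simp [PySem.List.enumerate]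
  | cons q rest' ih =>
      intro done p r hrd hlen hbound hget
      rw [PySem.List.enumerate_cons, List.foldl_cons, List.foldl_cons]
      -- facts about the suffix p :: q :: rest'
      have hsuffix : (p :: q :: rest').Pairwise (fun a b => b.2.1 ≤ a.2.1) :=
        (List.pairwise_append.mp (hrd ▸ hsort)).2.1
      have hqp : q.2.1 ≤ p.2.1 := (List.pairwise_cons.mp hsuffix).1 q (by simp)
      have hpd : p.2.1 ∈ distinct := (hdist p.2.1).mpr (by rw [hrd]; simp)
      have hqd : q.2.1 ∈ distinct := (hdist q.2.1).mpr (by rw [hrd]; simp)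
      have hslotp : pvSlot pn p < 7 := hslot p (by rw [hrd]; simp)
      have hslotq : pvSlot pn q < 7 := hslot q (by rw [hrd]; simp)
      -- the previous element that A re-reads is p
      have hprev : PySem.List.pyGet? rd (((done.length : Int) + 1) - 1) = some p := by
        have : ((done.length : Int) + 1) - 1 = (done.length : Int) := by ring
        rw [this, hrd]
        exact PySem.List.pyGet?_append_length done (q :: rest') p
      -- A's first-loop body on (done.length + 1, q) is B's step on q
      have hbody : pvBodyA pn rd r ((done.length : Int) + 1, q) = pvStepB pn distinct r q := by
        have hpos : ((done.length : Int) + 1) > 0 := by positivity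
        simp only [pvBodyA, pvStepB, hprev, Option.getD_some, if_pos hpos]
        by_cases heq : q.2.1 = p.2.1
        · rw [if_pos (by simpa using heq)]
          have hget' : r.getD ((PySem.List.index? pn p.1).getD 0) 0 = pvVal distinct p.2.1 := hget
          rw [hget', heq]
          rfl
        · rw [if_neg (by simpa using heq)]
          have hlt : q.2.1 < p.2.1 := lt_of_le_of_ne hqp heq
          -- max(ranking) is the rank of p
          have hvalmem : pvVal distinct p.2.1 ∈ r := by
            rw [← hget, List.getD_eq_getElem r 0 (by omega : pvSlot pn p < r.length)]
            exact List.getElem_mem _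
          have hmax : (PySem.List.max? r (fun x => x)).getD 0 = pvVal distinct p.2.1 :=
            pvMaxGetD r _ hvalmem hbound
          rw [hmax]
          -- no distinct center count lies strictly between q's and p's
          have hni : ∀ d ∈ distinct, ¬(q.2.1 < d ∧ d < p.2.1) := by
            intro d hd hcontra
            rw [hdist d, List.mem_map] at hd
            obtain ⟨t, ht, rfl⟩ := hd
            rw [hrd] at ht
            rcases List.mem_append.mp ht with hdone | hsuf
            · have := (List.pairwise_append.mp (hrd ▸ hsort)).2.2 t hdone p (by simp)
              omega
            · rcases List.mem_cons.mp hsuf with rfl | hsuf2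
              · omega
              rcases List.mem_cons.mp hsuf2 with rfl | hsuf3
              · omega
              · have := (List.pairwise_cons.mp (List.pairwise_cons.mp hsuffix).2).1 t hsuf3
                omega
          have hv := pvValStep distinct hdsort p.2.1 q.2.1 hlt hni hpd hqd
          rw [show ((PySem.List.index? distinct q.2.1).getD 0 : Int) + 1
              = pvVal distinct q.2.1 from rfl, hv]
      rw [hbody]
      -- re-establish the invariant and recurse with q as the new previous element
      have hmono : pvVal distinct p.2.1 ≤ pvVal distinct q.2.1 :=
        pvValMono distinct hdsort q.2.1 p.2.1 hqp hqd hpd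
      have hstep : pvStepB pn distinct r q
          = r.set (pvSlot pn q) (pvVal distinct q.2.1) := rfl
      rw [hstep]
      have hres := ih (done ++ [p]) q (r.set (pvSlot pn q) (pvVal distinct q.2.1))
        (by rw [hrd]; simp)
        (by simp [hlen])
        (by
          intro x hx
          rcases List.mem_or_eq_of_mem_set hx with hx' | rfl
          · exact le_trans (hbound x hx') hmono
          · exact le_refl _)
        (by
          rw [List.getD_eq_getElem _ 0 (by simp [hlen]; exact hslotq)]
          exact List.getElem_set_self _)
      have hlenarith : ((done ++ [p]).length : Int) + 1 = ((done.length : Int) + 1) + 1 := by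
        push_cast [List.length_append]
        simp
      rw [← hlenarith]
      exact hres

-- the second loops agree once the first element (index 0) has been passed
lemma pvLoop2 (pn : List String) (eo : List Int) (m : Int)
    (hm : m = (PySem.List.max? eo (fun x => x)).getD 0) :
    ∀ (rest : List (String × Int × Int)) (s : Int), 0 < s → ∀ (r : List Int),
    (PySem.List.enumerate rest s).foldl (pvBody2A pn eo) r
      = rest.foldl (pvBody2B pn m) r := by
  intro rest
  induction rest with
  | nil => intro s _ r; simp [PySem.List.enumerate]
  | cons q rest' ih =>
      intro s hs r
      rw [PySem.List.enumerate_cons, List.foldl_cons, List.foldl_cons]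
      have hbody : pvBody2A pn eo r (s, q) = pvBody2B pn m r q := by
        unfold pvBody2A pvBody2B
        rw [if_pos (by exact hs), hm]
      rw [hbody]
      exact ih (s + 1) (by omega) _


-- both programs, assembled: A's two enumerated loops equal B's table passes
lemma pvMain (pn : List String) (eo : List Int) (rd : List (String × Int × Int))
    (distinct : List Int)
    (hsort : rd.Pairwise (fun a b => b.2.1 ≤ a.2.1))
    (hslot : ∀ t ∈ rd, pvSlot pn t < 7)
    (hdist : ∀ c, c ∈ distinct ↔ c ∈ rd.map (fun t => t.2.1))
    (hdsort : distinct.Pairwise (fun a b => b < a)) :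
    (PySem.List.enumerate rd).foldl (pvBody2A pn eo)
      ((PySem.List.enumerate rd).foldl (pvBodyA pn rd) (List.replicate 7 0))
    = (rd.drop 1).foldl (pvBody2B pn ((PySem.List.max? eo (fun x => x)).getD 0))
      (rd.foldl (pvStepB pn distinct) (List.replicate 7 0)) := by
  rcases rd with _ | ⟨t0, rest⟩
  · simp [PySem.List.enumerate]
  · have ht0d : t0.2.1 ∈ distinct := (hdist t0.2.1).mpr (by simp)
    have hval1 : pvVal distinct t0.2.1 = 1 := by
      apply pvValTop distinct hdsort t0.2.1 ht0d
      intro d hd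
      rw [hdist d, List.mem_map] at hd
      obtain ⟨t, ht, rfl⟩ := hd
      rcases List.mem_cons.mp ht with rfl | ht'
      · exact le_refl _
      · exact (List.pairwise_cons.mp hsort).1 t ht'
    have hmax0 : (PySem.List.max? (List.replicate 7 (0 : Int)) (fun x => x)).getD 0 = 0 :=
      pvMaxGetD _ 0 (by simp) (by intro x hx; simp at hx; omega)
    have hv1 : ((PySem.List.index? distinct t0.2.1).getD 0 : Int) + 1 = 1 := hval1
    have h0 : pvBodyA pn (t0 :: rest) (List.replicate 7 0) (0, t0)
        = pvStepB pn distinct (List.replicate 7 0) t0 := by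
      simp only [pvBodyA, pvStepB, hmax0, hv1]
      norm_num
    have hfold1 : (PySem.List.enumerate (t0 :: rest)).foldl (pvBodyA pn (t0 :: rest))
        (List.replicate 7 0) = (t0 :: rest).foldl (pvStepB pn distinct) (List.replicate 7 0) := by
      rw [PySem.List.enumerate_cons, List.foldl_cons, List.foldl_cons, h0]
      have := pvLoop1 pn distinct (t0 :: rest) hsort hslot hdist hdsort rest [] t0
        (pvStepB pn distinct (List.replicate 7 0) t0)
        (by simp)
        (by simp [pvStepB])
        (by
          intro x hx
          rcases List.mem_or_eq_of_mem_set hx with hx' | rfl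
          · simp at hx'
            rw [hx', hval1]
            omega
          · exact le_refl _)
        (by
          have hslott0 : pvSlot pn t0 < 7 := hslot t0 (by simp)
          unfold pvStepB
          rw [show ((PySem.List.index? pn t0.1).getD 0) = pvSlot pn t0 from rfl]
          rw [List.getD_eq_getElem _ 0 (by simp; omega)]
          exact List.getElem_set_self _)
      simpa using this
    rw [hfold1]
    rw [PySem.List.enumerate_cons, List.foldl_cons]
    have h2 : pvBody2A pn eo ((t0 :: rest).foldl (pvStepB pn distinct) (List.replicate 7 0))
        (0, t0) = (t0 :: rest).foldl (pvStepB pn distinct) (List.replicate 7 0) := by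
      simp [pvBody2A]
    rw [h2, List.drop_one, List.tail_cons]
    exact pvLoop2 pn eo _ rfl rest 1 (by omega) _

-- ===== VERDICT (by name: the statement is the Claim_ definition above) =====
theorem compute_ranking_spec : Claim_equal_compute_ranking := by
  intro pn nc eo hdom hpre
  unfold Spec_compute_ranking
  rw [pvA_unfold, pvB_unfold]
  have hmeq : (if eo ≠ [] then (PySem.List.max? eo (fun x => x)).getD 0 else 0)
      = (PySem.List.max? eo (fun x => x)).getD 0 := by
    by_cases h : eo = []
    · subst h
      rw [if_neg (by simp)]
      rw [(PySem.List.max?_eq_none_iff ([] : List Int) (fun x => x)).mpr rfl]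
      rfl
    · rw [if_pos h]
  rw [hmeq]
  have hsort : (pvRd pn nc eo).Pairwise (fun a b => b.2.1 ≤ a.2.1) :=
    (PySem.List.sorted_pairwise (pn.zip (nc.zip eo)) (fun t => -t.2.1)).imp (fun h => by omega)
  have hslot : ∀ t ∈ pvRd pn nc eo, pvSlot pn t < 7 := fun t ht =>
    pvSlotLt pn t (hpre t ((PySem.List.mem_sorted _ _ _ t).mp ht))
  have hdist : ∀ c, c ∈ pvDistinct pn nc eo ↔ c ∈ (pvRd pn nc eo).map (fun t => t.2.1) := by
    intro c
    unfold pvDistinct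
    rw [PySem.List.mem_sorted, PySem.Set.mem_ofList]
  have hdsort : (pvDistinct pn nc eo).Pairwise (fun a b => b < a) := pvDistinctSorted _
  exact pvMain pn eo (pvRd pn nc eo) (pvDistinct pn nc eo) hsort hslot hdist hdsort
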